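-- pv_equiv track=rewrite | github.com/ai-research00/AegisPCAP | src/ingest/flow_builder.py | _calc_tcp_features
-- ===== SOURCE A (Python) =====
-- from typing import List, Dict, Tuple, DefaultDict
--
-- def _calc_tcp_features(packets: List[Dict]) -> Dict:
--     """Calculate TCP-specific features"""
--     tcp_packets = [p for p in packets if p.get("flags")]
--
--     if not tcp_packets:
--         return {}
--
--     features = {
--         "syn_count": sum(1 for p in tcp_packets if "S" in str(p.get("flags", ""))),
--         "fin_count": sum(1 for p in tcp_packets if "F" in str(p.get("flags", ""))),
--         "rst_count": sum(1 for p in tcp_packets if "R" in str(p.get("flags", ""))),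
--         "ack_count": sum(1 for p in tcp_packets if "A" in str(p.get("flags", ""))),
--         "psh_count": sum(1 for p in tcp_packets if "P" in str(p.get("flags", ""))),
--     }
--
--     return features
-- ===== SOURCE B (Python) =====
-- def _calc_tcp_features(packets):
--     """Calculate TCP-specific features (single pass over packets)."""
--     syn = fin = rst = ack = psh = 0
--     saw_tcp = False
--     for p in packets:
--         f = p.get("flags")
--         if not f:
--             continue
--         saw_tcp = True
--         s = str(f)
--         syn += "S" in s
--         fin += "F" in s
--         rst += "R" in s
--         ack += "A" in s
--         psh += "P" in s
--     if not saw_tcp: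
--         return {}
--     return {
--         "syn_count": syn,
--         "fin_count": fin,
--         "rst_count": rst,
--         "ack_count": ack,
--         "psh_count": psh,
--     }
-- ===== Notes on version B (the rewrite author's own statement) =====
-- stated objective: alternative
-- what changed: Replaces the intermediate filtered list plus five separate generator scans with one single pass over packets maintaining five integer counters and a saw_tcp flag.
import Mathlib
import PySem

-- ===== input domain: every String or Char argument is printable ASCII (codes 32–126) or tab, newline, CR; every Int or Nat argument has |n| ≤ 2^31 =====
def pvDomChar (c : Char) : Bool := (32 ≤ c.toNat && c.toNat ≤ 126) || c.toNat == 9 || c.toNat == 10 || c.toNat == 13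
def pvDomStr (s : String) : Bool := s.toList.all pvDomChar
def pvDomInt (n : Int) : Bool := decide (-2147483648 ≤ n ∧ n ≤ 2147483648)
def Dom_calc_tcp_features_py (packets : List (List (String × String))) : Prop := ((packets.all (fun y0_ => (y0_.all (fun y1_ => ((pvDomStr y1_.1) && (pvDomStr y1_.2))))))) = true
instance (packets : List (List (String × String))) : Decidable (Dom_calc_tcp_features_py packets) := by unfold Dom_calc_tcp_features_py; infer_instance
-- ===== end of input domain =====

-- B: one single pass with five counters and a saw_tcp flag instead of a filtered list plus five separate scans.
-- ===== PORT A =====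
-- p.get("flags", "") / str(p.get("flags")) — values are strings here, so str is the identity
def pvFlags (p : List (String × String)) : String :=
  PySem.Dict.getD (PySem.Dict.mk p) "flags" ""

def calc_tcp_features_py (packets : List (List (String × String))) : List (String × Int) :=
  let tcp_packets := packets.filter (fun p => pvFlags p ≠ "")
  if tcp_packets = [] then []
  else
    [("syn_count", (tcp_packets.countP (fun p => PySem.Str.isIn "S" (pvFlags p)) : Int)),
     ("fin_count", (tcp_packets.countP (fun p => PySem.Str.isIn "F" (pvFlags p)) : Int)),
     ("rst_count", (tcp_packets.countP (fun p => PySem.Str.isIn "R" (pvFlags p)) : Int)),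
     ("ack_count", (tcp_packets.countP (fun p => PySem.Str.isIn "A" (pvFlags p)) : Int)),
     ("psh_count", (tcp_packets.countP (fun p => PySem.Str.isIn "P" (pvFlags p)) : Int))]

-- ===== PORT B =====
-- state = (saw_tcp, syn, fin, rst, ack, psh)
def pvStep (st : Bool × Int × Int × Int × Int × Int) (p : List (String × String)) :
    Bool × Int × Int × Int × Int × Int :=
  let f := pvFlags p
  if f = "" then st
  else
    (true,
     st.2.1 + (if PySem.Str.isIn "S" f then 1 else 0),
     st.2.2.1 + (if PySem.Str.isIn "F" f then 1 else 0),
     st.2.2.2.1 + (if PySem.Str.isIn "R" f then 1 else 0),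
     st.2.2.2.2.1 + (if PySem.Str.isIn "A" f then 1 else 0),
     st.2.2.2.2.2 + (if PySem.Str.isIn "P" f then 1 else 0))

def calc_tcp_features_py_alt (packets : List (List (String × String))) : List (String × Int) :=
  let st := packets.foldl pvStep (false, 0, 0, 0, 0, 0)
  if st.1 then
    [("syn_count", st.2.1), ("fin_count", st.2.2.1), ("rst_count", st.2.2.2.1),
     ("ack_count", st.2.2.2.2.1), ("psh_count", st.2.2.2.2.2)]
  else []

-- ===== PRECONDITION & SPEC =====
def Spec_calc_tcp_features_py (packets : List (List (String × String))) (out : List (String × Int)) : Prop := out = calc_tcp_features_py_alt packets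
instance (packets : List (List (String × String))) (out : List (String × Int)) : Decidable (Spec_calc_tcp_features_py packets out) := by unfold Spec_calc_tcp_features_py; infer_instance

-- ===== CLAIM (what is proved, stated in full; the proofs are below) =====
def Claim_equal_calc_tcp_features_py : Prop := ∀ (packets : List (List (String × String))), Dom_calc_tcp_features_py packets → Spec_calc_tcp_features_py packets (calc_tcp_features_py packets)

-- ===== LEMMAS AND PROOFS =====

lemma pvFold_spec (l : List (List (String × String))) (b : Bool) (s f r a p : Int) :
    l.foldl pvStep (b, s, f, r, a, p) =
      (b || l.any (fun x => pvFlags x ≠ ""),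
       s + (l.countP (fun x => pvFlags x ≠ "" && PySem.Str.isIn "S" (pvFlags x)) : Int),
       f + (l.countP (fun x => pvFlags x ≠ "" && PySem.Str.isIn "F" (pvFlags x)) : Int),
       r + (l.countP (fun x => pvFlags x ≠ "" && PySem.Str.isIn "R" (pvFlags x)) : Int),
       a + (l.countP (fun x => pvFlags x ≠ "" && PySem.Str.isIn "A" (pvFlags x)) : Int),
       p + (l.countP (fun x => pvFlags x ≠ "" && PySem.Str.isIn "P" (pvFlags x)) : Int)) := by
  induction l generalizing b s f r a p with
  | nil => simp
  | cons hd tl ih =>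
    by_cases h : pvFlags hd = ""
    · simp [pvStep, h, ih]
    · simp [pvStep, h, List.countP_cons, ih]
      refine ⟨?_, ?_, ?_, ?_, ?_⟩ <;> split_ifs <;> ring

-- ===== VERDICT (by name: the statement is the Claim_ definition above) =====
theorem calc_tcp_features_py_spec : Claim_equal_calc_tcp_features_py := by
  intro packets _
  unfold Spec_calc_tcp_features_py calc_tcp_features_py calc_tcp_features_py_alt
  rw [pvFold_spec]
  have hc : ∀ sub : String,
      List.countP (fun a => PySem.Str.isIn sub (pvFlags a) && !decide (pvFlags a = "")) packets
        = List.countP (fun x => !decide (pvFlags x = "") && PySem.Str.isIn sub (pvFlags x)) packets := by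
    intro sub
    exact List.countP_congr (fun x _ => by simp [Bool.and_comm])
  simp only [Bool.false_or, zero_add, List.countP_filter, ne_eq, List.filter_eq_nil_iff,
    decide_not, Bool.not_eq_eq_eq_not, Bool.not_true, decide_eq_false_iff_not, not_not,
    List.any_eq_true]
  split_ifs with h1 h2 h2
  · obtain ⟨x, hx, hne⟩ := h2
    exact absurd (h1 x hx) hne
  · rfl
  · rw [hc "S", hc "F", hc "R", hc "A", hc "P"]
  · exact absurd (fun a ha => by by_contra hne; exact h2 ⟨a, ha, hne⟩) h1
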